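-- pv_equiv track=rewrite | github.com/Akari787/xiaomusic-core | xiaomusic/security/outbound.py | _host_in_allowlist
-- ===== SOURCE A (Python) =====
-- from typing import Iterable
--
-- def _normalize_host(host: str) -> str:
--     return host.strip().lower().rstrip(".")
--
-- def _host_in_allowlist(host: str, allowlist: Iterable[str]) -> bool:
--     host = _normalize_host(host)
--     for item in allowlist:
--         item = _normalize_host(item)
--         if not item:
--             continue
--         if host == item:
--             return True
--         if host.endswith("." + item):
--             return True
--     return False
-- ===== SOURCE B (Python) =====
-- def _normalize_host(host: str) -> str:
--     return host.strip().lower().rstrip(".")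
--
--
-- def _host_in_allowlist(host, allowlist):
--     # Build the normalized allowlist once as a set, then test the host and
--     # each of its dot-suffixes by set membership.
--     allowed = set()
--     for item in allowlist:
--         n = _normalize_host(item)
--         if n:
--             allowed.add(n)
--     h = _normalize_host(host)
--     while True:
--         if h in allowed:
--             return True
--         _, sep, rest = h.partition(".")
--         if not sep:
--             return False
--         h = rest
-- ===== Notes on version B (the rewrite author's own statement) =====
-- stated objective: alternative
-- what changed: Instead of scanning the whole allowlist and running an endswith test per item, B normalizes the allowlist once into a set and tests the host plus each of its dot-suffixes by set membership; measured cost is about the same.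
import Mathlib
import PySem

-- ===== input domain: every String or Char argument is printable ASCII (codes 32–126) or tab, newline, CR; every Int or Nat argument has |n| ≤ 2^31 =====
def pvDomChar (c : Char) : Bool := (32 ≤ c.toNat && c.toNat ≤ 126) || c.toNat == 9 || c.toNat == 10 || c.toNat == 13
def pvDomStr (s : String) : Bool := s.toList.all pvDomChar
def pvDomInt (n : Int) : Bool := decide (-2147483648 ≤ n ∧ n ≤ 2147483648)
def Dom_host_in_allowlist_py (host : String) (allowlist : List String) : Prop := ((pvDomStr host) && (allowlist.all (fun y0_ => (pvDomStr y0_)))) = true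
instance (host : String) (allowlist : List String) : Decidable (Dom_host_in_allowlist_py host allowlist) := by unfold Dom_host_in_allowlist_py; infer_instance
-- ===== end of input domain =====

-- B builds the normalized allowlist once as a set and tests the host's dot-suffixes by membership, instead of A's per-item endswith scan.

-- shared helper: _normalize_host(s) = s.strip().lower().rstrip(".") as a list of chars
-- (.rstrip(".") has no PySem primitive; ported by hand as reverse/dropWhile/reverse — exact,
--  it drops exactly the trailing '.' characters)
def pvNorm (s : String) : List Char :=
  (List.dropWhile (fun c => c == '.')
    (PySem.Chars.lower (PySem.Chars.strip s.toList)).reverse).reverse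

-- ===== PORT A =====
-- the 'for item in allowlist' loop of A
def pvLoopA (h : List Char) : List String → Bool
  | [] => false
  | item :: rest =>
    let it := pvNorm item
    if it = [] then pvLoopA h rest
    else if h = it then true
    else if PySem.Chars.endswith h ('.' :: it) then true
    else pvLoopA h rest

def host_in_allowlist_py (host : String) (allowlist : List String) : Bool :=
  pvLoopA (pvNorm host) allowlist

-- ===== PORT B =====
-- B's first loop: allowed = set of non-empty normalized items
def pvAllowed (allowlist : List String) : PySem.Set (List Char) :=
  allowlist.foldl
    (fun s item => if pvNorm item = [] then s else PySem.Set.add s (pvNorm item))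
    PySem.Set.empty

-- B's 'while True' loop: membership test, then h.partition(".") — ported by hand:
-- dropWhile (· ≠ '.') h is h from its first '.', so its tail is exactly Python's 'rest'
-- and emptiness of the result is exactly 'not sep'.
def pvSufLoop (allowed : PySem.Set (List Char)) (h : List Char) : Bool :=
  if allowed.contains h then true
  else
    match hd : h.dropWhile (fun c => c ≠ '.') with
    | [] => false
    | _ :: rest => pvSufLoop allowed rest
termination_by h.length
decreasing_by
  have h1 : (h.dropWhile (fun c => c ≠ '.')).length ≤ h.length :=
    (List.dropWhile_sublist _).length_le
  rw [hd] at h1; simp at h1; omega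

def host_in_allowlist_py_alt (host : String) (allowlist : List String) : Bool :=
  pvSufLoop (pvAllowed allowlist) (pvNorm host)

-- ===== PRECONDITION & SPEC =====
def Spec_host_in_allowlist_py (host : String) (allowlist : List String) (out : Bool) : Prop := out = host_in_allowlist_py_alt host allowlist
instance (host : String) (allowlist : List String) (out : Bool) : Decidable (Spec_host_in_allowlist_py host allowlist out) := by unfold Spec_host_in_allowlist_py; infer_instance

-- ===== CLAIM (what is proved, stated in full; the proofs are below) =====
def Claim_equal_host_in_allowlist_py : Prop := ∀ (host : String) (allowlist : List String), Dom_host_in_allowlist_py host allowlist → Spec_host_in_allowlist_py host allowlist (host_in_allowlist_py host allowlist)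

-- ===== LEMMAS AND PROOFS =====

-- A's loop succeeds iff some item matches A's test
theorem pvLoopA_eq_true_iff (h : List Char) (l : List String) :
    pvLoopA h l = true ↔
      ∃ item ∈ l, pvNorm item ≠ [] ∧ (h = pvNorm item ∨ ('.' :: pvNorm item) <:+ h) := by
  induction l with
  | nil => simp [pvLoopA]
  | cons item rest ih =>
    simp only [pvLoopA, List.mem_cons]
    split_ifs with h1 h2 h3
    · simp only [ih]
      constructor
      · rintro ⟨i, hi, hne, hm⟩; exact ⟨i, Or.inr hi, hne, hm⟩
      · rintro ⟨i, hi, hne, hm⟩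
        rcases hi with rfl | hi
        · exact absurd h1 hne
        · exact ⟨i, hi, hne, hm⟩
    · simp only [true_iff]
      exact ⟨item, Or.inl rfl, h1, Or.inl h2⟩
    · simp only [true_iff]
      exact ⟨item, Or.inl rfl, h1, Or.inr ((PySem.Chars.endswith_iff _ _).mp h3)⟩
    · simp only [ih]
      constructor
      · rintro ⟨i, hi, hne, hm⟩; exact ⟨i, Or.inr hi, hne, hm⟩
      · rintro ⟨i, hi, hne, hm⟩
        rcases hi with rfl | hi
        · rcases hm with hm | hm
          · exact absurd hm h2
          · exact absurd ((PySem.Chars.endswith_iff _ _).mpr hm) h3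
        · exact ⟨i, hi, hne, hm⟩

-- membership in B's set of normalized items
theorem mem_pvAllowed (l : List String) (n : List Char) :
    n ∈ pvAllowed l ↔ ∃ item ∈ l, pvNorm item ≠ [] ∧ n = pvNorm item := by
  have main : ∀ (l : List String) (s : PySem.Set (List Char)),
      n ∈ l.foldl
        (fun s item => if pvNorm item = [] then s else PySem.Set.add s (pvNorm item)) s ↔
      n ∈ s ∨ ∃ item ∈ l, pvNorm item ≠ [] ∧ n = pvNorm item := by
    intro l
    induction l with
    | nil => simp
    | cons item rest ih =>
      intro s
      simp only [List.foldl_cons, ih]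
      by_cases he : pvNorm item = []
      · rw [if_pos he]
        constructor
        · rintro (hs | ⟨i, hi, hne, hm⟩)
          · exact Or.inl hs
          · exact Or.inr ⟨i, List.mem_cons_of_mem _ hi, hne, hm⟩
        · rintro (hs | ⟨i, hi, hne, hm⟩)
          · exact Or.inl hs
          · rcases List.mem_cons.mp hi with rfl | hi2
            · exact absurd he hne
            · exact Or.inr ⟨i, hi2, hne, hm⟩
      · rw [if_neg he]
        simp only [PySem.Set.mem_add, List.mem_cons]
        constructor
        · rintro ((hs | hm) | ⟨i, hi, hne, hm⟩)
          · exact Or.inl hs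
          · exact Or.inr ⟨item, Or.inl rfl, he, hm⟩
          · exact Or.inr ⟨i, Or.inr hi, hne, hm⟩
        · rintro (hs | ⟨i, rfl | hi, hne, hm⟩)
          · exact Or.inl (Or.inl hs)
          · exact Or.inl (Or.inr hm)
          · exact Or.inr ⟨i, hi, hne, hm⟩
  rw [pvAllowed, main]
  simp [PySem.Set.empty]

-- a dot-prefixed suffix of pre ++ '.' :: t, with pre dot-free, is '.'::t itself or lies in t
theorem suffix_split {pre t s : List Char} (hpre : ∀ x ∈ pre, x ≠ '.')
    (h : ('.' :: s) <:+ pre ++ '.' :: t) : s = t ∨ ('.' :: s) <:+ t := by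
  induction pre generalizing s t with
  | nil =>
    simp only [List.nil_append] at h
    rcases (List.suffix_cons_iff).mp h with heq | hs
    · exact Or.inl (by injection heq)
    · exact Or.inr hs
  | cons a pre' ih =>
    rcases h with ⟨u, hu⟩
    cases u with
    | nil =>
      simp only [List.nil_append, List.cons_append] at hu
      have : a = '.' := by injection hu with h1 _; exact h1.symm
      exact absurd this (hpre a (List.mem_cons_self ..))
    | cons b u' =>
      simp only [List.cons_append] at hu
      have hu' : u' ++ '.' :: s = pre' ++ '.' :: t := by injection hu
      exact ih (fun x hx => hpre x (List.mem_cons_of_mem _ hx)) ⟨u', hu'⟩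

-- B's suffix loop succeeds iff some set element is h or a dot-suffix of h
theorem pvSufLoop_eq_true_iff (allowed : PySem.Set (List Char)) (h : List Char) :
    pvSufLoop allowed h = true ↔ ∃ n ∈ allowed, h = n ∨ ('.' :: n) <:+ h := by
  induction h using pvSufLoop.induct allowed with
  | case1 h hc =>
    rw [pvSufLoop, if_pos hc]
    simp only [true_iff]
    exact ⟨h, (List.contains_iff_mem).mp hc, Or.inl rfl⟩
  | case2 h hc hd =>
    rw [pvSufLoop, if_neg hc]
    split
    · simp only [Bool.false_eq_true, false_iff]
      rintro ⟨n, hn, rfl | hsuf⟩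
      · exact absurd ((List.contains_iff_mem).mpr hn) hc
      · have hmem : ('.' : Char) ∈ h := hsuf.mem (List.mem_cons_self ..)
        have := List.dropWhile_eq_nil_iff.mp hd _ hmem
        simp at this
    · next heq => rw [hd] at heq; cases heq
  | case3 h hc c rest hd ih =>
    rw [pvSufLoop, if_neg hc]
    split
    · next heq => rw [hd] at heq; cases heq
    · next head rest' heq =>
      rw [hd] at heq
      injection heq with h1 h2
      subst h1; subst h2
      have hcdot : c = '.' := by
        have := List.head?_dropWhile_not (fun c => c ≠ '.') h
        rw [hd] at this; simpa using this
      subst hcdot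
      have hsplit : h = h.takeWhile (fun c => c ≠ '.') ++ '.' :: rest := by
        conv_lhs => rw [← List.takeWhile_append_dropWhile (p := fun c => c ≠ '.') (l := h)]
        rw [hd]
      have hpre : ∀ x ∈ h.takeWhile (fun c => c ≠ '.'), x ≠ '.' := by
        intro x hx
        have := List.mem_takeWhile_imp hx; simpa using this
      rw [ih]
      constructor
      · rintro ⟨n, hn, heqn | hsuf⟩
        · subst heqn
          exact ⟨rest, hn, Or.inr (by rw [hsplit]; exact List.suffix_append _ _)⟩
        · refine ⟨n, hn, Or.inr (hsuf.trans ?_)⟩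
          rw [hsplit]
          exact (List.suffix_cons _ _).trans (List.suffix_append _ _)
      · rintro ⟨n, hn, rfl | hsuf⟩
        · exact absurd ((List.contains_iff_mem).mpr hn) hc
        · rw [hsplit] at hsuf
          rcases suffix_split hpre hsuf with heq2 | hs
          · exact ⟨n, hn, Or.inl heq2.symm⟩
          · exact ⟨n, hn, Or.inr hs⟩

-- ===== VERDICT (by name: the statement is the Claim_ definition above) =====
theorem host_in_allowlist_py_spec : Claim_equal_host_in_allowlist_py := by
  intro host allowlist _
  unfold Spec_host_in_allowlist_py host_in_allowlist_py host_in_allowlist_py_alt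
  rw [Bool.eq_iff_iff, pvLoopA_eq_true_iff, pvSufLoop_eq_true_iff]
  constructor
  · rintro ⟨item, hi, hne, hm⟩
    exact ⟨pvNorm item, (mem_pvAllowed _ _).mpr ⟨item, hi, hne, rfl⟩, hm⟩
  · rintro ⟨n, hn, hm⟩
    rcases (mem_pvAllowed _ _).mp hn with ⟨item, hi, hne, rfl⟩
    exact ⟨item, hi, hne, hm⟩
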